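-- pv_equiv track=rewrite | github.com/HermaeusMorea/Loombound | src/runtime/play_cli.py | _collect_lookahead_targets
-- ===== SOURCE A (Python) =====
-- def _collect_lookahead_targets(saga: dict[str, object], next_nodes: list[str]) -> list[str]:
--     """Return unique grandchild saga waypoint IDs in stable order."""
--
--     targets: list[str] = []
--     seen: set[str] = set()
--     nodes = saga.get("waypoints", {})
--     for next_id in next_nodes:
--         next_saga_waypoint = nodes.get(next_id, {})
--         for lookahead_id in next_saga_waypoint.get("next_waypoints", []):
--             if lookahead_id in seen:
--                 continue
--             seen.add(lookahead_id)
--             targets.append(lookahead_id)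
--     return targets
-- ===== SOURCE B (Python) =====
-- def _collect_lookahead_targets(saga: dict[str, object], next_nodes: list[str]) -> list[str]:
--     """Return unique grandchild saga waypoint IDs in stable order."""
--     nodes = saga.get("waypoints", {})
--     ids: list[str] = []
--     for next_id in next_nodes:
--         ids.extend(nodes.get(next_id, {}).get("next_waypoints", []))
--     targets: list[str] = []
--     while ids:
--         head = ids[0]
--         targets.append(head)
--         ids = [x for x in ids[1:] if x != head]
--     return targets
-- ===== Notes on version B (the rewrite author's own statement) =====
-- stated objective: alternative
-- what changed: Drops the seen-set entirely: B flattens the grandchild IDs, then removes duplicates by a take-head-and-filter loop (append the first remaining element, filter every later occurrence of it out of the remainder); Pre_ only states that the association lists modelling the dicts have distinct keys, which every real Python dict input satisfies.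
import Mathlib
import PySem

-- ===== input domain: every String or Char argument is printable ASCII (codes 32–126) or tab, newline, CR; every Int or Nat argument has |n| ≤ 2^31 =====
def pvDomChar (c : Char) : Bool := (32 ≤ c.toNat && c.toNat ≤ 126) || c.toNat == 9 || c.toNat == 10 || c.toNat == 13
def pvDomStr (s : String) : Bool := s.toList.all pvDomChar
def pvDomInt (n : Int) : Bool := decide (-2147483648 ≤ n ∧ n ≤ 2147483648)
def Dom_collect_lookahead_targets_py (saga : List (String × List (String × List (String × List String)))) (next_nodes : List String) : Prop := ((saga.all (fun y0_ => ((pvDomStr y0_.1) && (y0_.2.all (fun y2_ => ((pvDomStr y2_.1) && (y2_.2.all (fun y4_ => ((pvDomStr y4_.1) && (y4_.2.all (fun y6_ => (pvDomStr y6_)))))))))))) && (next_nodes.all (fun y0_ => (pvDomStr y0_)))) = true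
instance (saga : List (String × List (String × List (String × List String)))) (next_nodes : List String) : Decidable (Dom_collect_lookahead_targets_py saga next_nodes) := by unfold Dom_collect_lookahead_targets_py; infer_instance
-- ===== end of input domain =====

-- B drops A's seen-set: it flattens the grandchild IDs, then removes duplicates with a
-- take-head-and-filter loop (append the first remaining id, filter its later occurrences out);
-- alternative decomposition, same result.

-- ===== PORT A =====
-- literal transliteration of A: one fused loop carrying (targets, seen)
def collect_lookahead_targets_py (saga : List (String × List (String × List (String × List String)))) (next_nodes : List String) : List String :=
  let nodes := (PySem.Dict.mk saga).getD "waypoints" []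
  let st :=
    next_nodes.foldl
      (fun (st : List String × PySem.Set String) next_id =>
        let next_saga_waypoint := (PySem.Dict.mk nodes).getD next_id []
        ((PySem.Dict.mk next_saga_waypoint).getD "next_waypoints" []).foldl
          (fun (st : List String × PySem.Set String) lookahead_id =>
            if PySem.Set.contains st.2 lookahead_id then st
            else (st.1 ++ [lookahead_id], PySem.Set.add st.2 lookahead_id))
          st)
      ([], PySem.Set.empty)
  st.1

-- ===== PORT B =====
-- B's while loop: take the head, append it, filter its duplicates out of the rest
def pvNubLoop : List String → List String → List String
  | [], targets => targets
  | head :: rest, targets =>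
      pvNubLoop (rest.filter (fun x => x ≠ head)) (targets ++ [head])
termination_by ids _ => ids.length
decreasing_by
  simp only [List.length_unattach]
  exact Nat.lt_succ_of_le (le_trans (List.length_filter_le _ _) (by simp))

def collect_lookahead_targets_py_alt (saga : List (String × List (String × List (String × List String)))) (next_nodes : List String) : List String :=
  let nodes := (PySem.Dict.mk saga).getD "waypoints" []
  let ids := next_nodes.foldl
    (fun acc next_id =>
      acc ++ (PySem.Dict.mk ((PySem.Dict.mk nodes).getD next_id [])).getD "next_waypoints" [])
    []
  pvNubLoop ids []

-- ===== PRECONDITION & SPEC =====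
-- Lean association lists model Python dicts, whose keys are always distinct: Pre_ states that
-- saga and its "waypoints" table (and each waypoint dict) have pairwise-distinct keys — every
-- input that comes from an actual Python dict satisfies it (it excludes no Python-reachable input).
def Pre_collect_lookahead_targets_py (saga : List (String × List (String × List (String × List String)))) (next_nodes : List String) : Prop :=
  (saga.map Prod.fst).Nodup ∧
  (((PySem.Dict.mk saga).getD "waypoints" []).map Prod.fst).Nodup ∧
  ∀ p ∈ (PySem.Dict.mk saga).getD "waypoints" [], (p.2.map Prod.fst).Nodup
instance (saga : List (String × List (String × List (String × List String)))) (next_nodes : List String) : Decidable (Pre_collect_lookahead_targets_py saga next_nodes) := by unfold Pre_collect_lookahead_targets_py; infer_instance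
def pvWitness_collect_lookahead_targets_py : (List (String × List (String × List (String × List String)))) × List String :=
  ([("waypoints", [("n1", [("next_waypoints", ["g1", "g2"])]), ("n2", [("next_waypoints", ["g2", "g3"])])])], ["n1", "n2"])
def Spec_collect_lookahead_targets_py (saga : List (String × List (String × List (String × List String)))) (next_nodes : List String) (out : List String) : Prop := out = collect_lookahead_targets_py_alt saga next_nodes
instance (saga : List (String × List (String × List (String × List String)))) (next_nodes : List String) (out : List String) : Decidable (Spec_collect_lookahead_targets_py saga next_nodes out) := by unfold Spec_collect_lookahead_targets_py; infer_instance

-- ===== CLAIM =====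
def Claim_equal_collect_lookahead_targets_py : Prop := ∀ (saga : List (String × List (String × List (String × List String)))) (next_nodes : List String), Dom_collect_lookahead_targets_py saga next_nodes → Pre_collect_lookahead_targets_py saga next_nodes → Spec_collect_lookahead_targets_py saga next_nodes (collect_lookahead_targets_py saga next_nodes)

-- ===== LEMMAS AND PROOFS =====

-- A's fused inner loop started from a state (t, t) keeps both components equal,
-- each being the running Set.add fold.
lemma pvInnerPair (l : List String) (t : List String) :
    l.foldl
      (fun (st : List String × PySem.Set String) x =>
        if PySem.Set.contains st.2 x then st
        else (st.1 ++ [x], PySem.Set.add st.2 x))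
      (t, t)
    = (l.foldl PySem.Set.add t, l.foldl PySem.Set.add t) := by
  induction l generalizing t with
  | nil => rfl
  | cons x xs ih =>
      simp only [List.foldl_cons]
      by_cases h : x ∈ t
      · simpa [PySem.Set.add, h] using ih t
      · simpa [PySem.Set.add, h] using ih (t ++ [x])

-- A's outer loop over next_nodes, started from ([], []), equals the plain Set.add fold
-- over the same nested traversal (both components).
lemma pvOuterPair (f : String → List String) (L : List String) (t : List String) :
    L.foldl
      (fun (st : List String × PySem.Set String) nid =>
        (f nid).foldl
          (fun (st : List String × PySem.Set String) x =>
            if PySem.Set.contains st.2 x then st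
            else (st.1 ++ [x], PySem.Set.add st.2 x))
          st)
      (t, t)
    = (L.foldl (fun acc nid => (f nid).foldl PySem.Set.add acc) t,
       L.foldl (fun acc nid => (f nid).foldl PySem.Set.add acc) t) := by
  induction L generalizing t with
  | nil => rfl
  | cons nid rest ih =>
      simp only [List.foldl_cons, pvInnerPair]
      exact ih _

-- Folding Set.add skips elements already present, so filtering out a present element changes nothing.
lemma pvFoldAddFilter (L : List String) (acc : PySem.Set String) (h : String)
    (hmem : h ∈ acc) :
    L.foldl PySem.Set.add acc = (L.filter (fun x => x ≠ h)).foldl PySem.Set.add acc := by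
  induction L generalizing acc with
  | nil => rfl
  | cons x xs ih =>
      by_cases hx : x = h
      · subst hx
        simp only [List.foldl_cons, List.filter_cons]
        simpa [PySem.Set.add, hmem] using ih acc hmem
      · simp only [List.foldl_cons, List.filter_cons, hx, decide_eq_true_eq,
          ne_eq, not_false_iff, if_pos]
        have hmem' : h ∈ PySem.Set.add acc x := by
          simp [PySem.Set.add]; split <;> simp [hmem]
        simpa using ih (PySem.Set.add acc x) hmem'

-- B's take-head-and-filter loop computes the Set.add fold, provided no pending id is already output.
lemma pvNubLoop_eq (L : List String) (acc : List String)
    (hdisj : ∀ x ∈ L, x ∉ acc) :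
    pvNubLoop L acc = L.foldl PySem.Set.add acc := by
  induction hL : L.length using Nat.strong_induction_on generalizing L acc with
  | _ n ih =>
    cases L with
    | nil => rw [pvNubLoop.eq_def]; rfl
    | cons head rest =>
        have hhead : head ∉ acc := hdisj head (by simp)
        have hadd : PySem.Set.add acc head = acc ++ [head] := by
          simp [PySem.Set.add, hhead]
        rw [show pvNubLoop (head :: rest) acc = pvNubLoop (rest.filter (fun x => x ≠ head)) (acc ++ [head]) from by rw [pvNubLoop.eq_def], List.foldl_cons, hadd]
        have hlen : (rest.filter (fun x => x ≠ head)).length < n := by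
          subst hL
          exact Nat.lt_succ_of_le (List.length_filter_le _ _)
        have hdisj' : ∀ x ∈ rest.filter (fun x => x ≠ head), x ∉ acc ++ [head] := by
          intro x hx
          simp only [List.mem_filter, ne_eq, decide_eq_true_eq] at hx
          simp only [List.mem_append, List.mem_singleton]
          push_neg
          exact ⟨hdisj x (List.mem_cons_of_mem _ hx.1), hx.2⟩
        rw [ih _ hlen _ _ hdisj' rfl]
        exact (pvFoldAddFilter rest (acc ++ [head]) head (by simp)).symm

-- ===== VERDICT =====
theorem collect_lookahead_targets_py_spec : Claim_equal_collect_lookahead_targets_py := by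
  intro saga next_nodes _ _
  unfold Spec_collect_lookahead_targets_py
  unfold collect_lookahead_targets_py collect_lookahead_targets_py_alt
  dsimp only
  rw [show (PySem.Set.empty : PySem.Set String) = ([] : List String) from rfl]
  rw [pvOuterPair]
  rw [pvNubLoop_eq _ _ (by simp)]
  simp only [PySem.List.foldl_append_eq_flatMap, List.nil_append, List.foldl_flatMap]
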